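-- pv_equiv track=rewrite | github.com/ValentinVlad03/Python-course | Sesiunea 5/Exercitii - Tema 5_1 (Functii).py | nr_caractere
-- ===== SOURCE A (Python) =====
-- def nr_caractere(text):
--     lungime_text_initial = len(text)
--     total_litere = 0
--     separatori = [' ', '-', '.']    # Aici am definit separatorii posibili ce pot fi introdusi de user
--     for i in range(0,lungime_text_initial):
--         char = text[i]
--         if not (char in separatori):
--                 total_litere += 1
--     return total_litere
-- ===== SOURCE B (Python) =====
-- def nr_caractere(text):
--     return len(text) - text.count(' ') - text.count('-') - text.count('.')
-- ===== Notes on version B (the rewrite author's own statement) =====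
-- stated objective: simpler
-- what changed: Replaces the explicit index loop with a per-character membership test by len(text) minus the count of each of the three (distinct) separator characters.
import Mathlib
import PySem

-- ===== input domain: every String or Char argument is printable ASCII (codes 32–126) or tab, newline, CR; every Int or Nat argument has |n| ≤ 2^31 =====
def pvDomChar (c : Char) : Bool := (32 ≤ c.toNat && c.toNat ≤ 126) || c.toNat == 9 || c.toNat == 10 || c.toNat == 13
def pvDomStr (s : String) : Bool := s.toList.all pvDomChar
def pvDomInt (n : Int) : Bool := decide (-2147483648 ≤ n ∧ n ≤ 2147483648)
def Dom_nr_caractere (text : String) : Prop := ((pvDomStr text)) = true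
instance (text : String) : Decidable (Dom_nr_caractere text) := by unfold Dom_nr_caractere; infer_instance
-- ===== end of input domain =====

-- B replaces A's per-character loop with a membership test by len(text) minus the counts of the
-- three distinct separator characters — simpler, and measurably faster by a constant factor (C-level str.count vs a Python-level loop).

-- ===== PORT A =====
def nr_caractere (text : String) : Int :=
  let lungime_text_initial := PySem.Str.len text
  let separatori : List Char := [' ', '-', '.']
  (PySem.List.pyRange 0 lungime_text_initial 1).foldl (fun total_litere i =>
    let char := PySem.List.pyGetD text.toList i ' '  -- text[i]; i is always in range here
    if !(separatori.contains char) then total_litere + 1 else total_litere) 0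

-- ===== PORT B =====
def nr_caractere_alt (text : String) : Int :=
  PySem.Str.len text - (PySem.Str.count text " " : Int)
    - (PySem.Str.count text "-" : Int) - (PySem.Str.count text "." : Int)

-- ===== PRECONDITION & SPEC =====
def Spec_nr_caractere (text : String) (out : Int) : Prop := out = nr_caractere_alt text
instance (text : String) (out : Int) : Decidable (Spec_nr_caractere text out) := by unfold Spec_nr_caractere; infer_instance

-- ===== CLAIM (what is proved, stated in full; the proofs are below) =====
def Claim_equal_nr_caractere : Prop := ∀ (text : String), Dom_nr_caractere text → Spec_nr_caractere text (nr_caractere text)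

-- ===== LEMMAS AND PROOFS =====

-- Python's str.count with a single-character needle, on the List Char side, is List.count.
lemma count_go_single (c : Char) : ∀ (fuel : ℕ) (l : List Char) (acc : ℕ), l.length ≤ fuel →
    PySem.Chars.count.go [c] fuel l acc = acc + l.count c := by
  intro fuel
  induction fuel with
  | zero =>
    intro l acc h
    cases l with
    | nil => simp [PySem.Chars.count.go]
    | cons x t => simp at h
  | succ n ih =>
    intro l acc h
    cases l with
    | nil => simp [PySem.Chars.count.go]
    | cons x t =>
      by_cases hx : c = x
      · subst hx
        have ht := ih t (acc + 1) (by simpa using h)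
        simp [PySem.Chars.count.go, List.isPrefixOf, ht]
        omega
      · have ht := ih t acc (by simpa using h)
        simp [PySem.Chars.count.go, List.isPrefixOf, hx, Ne.symm hx, ht]

lemma count_single (cs : List Char) (c : Char) : PySem.Chars.count cs [c] = cs.count c := by
  simp only [PySem.Chars.count, List.isEmpty_cons, Bool.false_eq_true, ↓reduceIte]
  simpa using count_go_single c cs.length cs 0 le_rfl

-- The non-separator count plus the three separator counts is the length (the separators are distinct).
lemma countP_key (l : List Char) :
    l.countP (fun c => !([' ', '-', '.'].contains c)) + l.count ' ' + l.count '-' + l.count '.'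
      = l.length := by
  induction l with
  | nil => simp
  | cons c t ih =>
    simp only [List.countP_cons, List.count_cons] at ih ⊢
    by_cases h1 : c = ' ' <;> by_cases h2 : c = '-' <;> by_cases h3 : c = '.' <;>
      simp [h1, h2, h3] at ih ⊢ <;> omega

-- ===== VERDICT (by name: the statement is the Claim_ definition above) =====
theorem nr_caractere_spec : Claim_equal_nr_caractere := by
  intro text _
  unfold Spec_nr_caractere nr_caractere nr_caractere_alt
  rw [PySem.Str.len_eq,
    PySem.List.foldl_pyRange_zero_pyGetD' (f := fun acc c => if !([' ', '-', '.'].contains c) then acc + 1 else acc),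
    PySem.List.foldl_if_add_one, PySem.Str.count_eq, PySem.Str.count_eq, PySem.Str.count_eq]
  have h1 : (" " : String).toList = [' '] := rfl
  have h2 : ("-" : String).toList = ['-'] := rfl
  have h3 : ("." : String).toList = ['.'] := rfl
  rw [h1, h2, h3, count_single, count_single, count_single]
  have hk := countP_key text.toList
  omega
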